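-- pv_equiv track=rewrite | github.com/ShapeLayer/training | tasks/online_judge/baekjoon/python/28065.py | compute
-- ===== SOURCE A (Python) =====
-- def compute(n: int) -> list[int]:
--     result = []
--     l, r = 1, n
--     prev_is_left = False
--     while l <= r:
--         if not prev_is_left:
--             result.append(l)
--             l += 1
--         else:
--             result.append(r)
--             r -= 1
--         prev_is_left = not prev_is_left
--     return result
-- ===== SOURCE B (Python) =====
-- def compute(n: int) -> list[int]:
--     return [i // 2 + 1 if i % 2 == 0 else n - i // 2 for i in range(n)]
-- ===== Notes on version B (the rewrite author's own statement) =====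
-- stated objective: simpler
-- what changed: Replaces the two-converging-pointer loop with parity flag by a one-line comprehension computing each element as a closed-form function of its position (even index i -> i//2+1, odd -> n - i//2).
import Mathlib
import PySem

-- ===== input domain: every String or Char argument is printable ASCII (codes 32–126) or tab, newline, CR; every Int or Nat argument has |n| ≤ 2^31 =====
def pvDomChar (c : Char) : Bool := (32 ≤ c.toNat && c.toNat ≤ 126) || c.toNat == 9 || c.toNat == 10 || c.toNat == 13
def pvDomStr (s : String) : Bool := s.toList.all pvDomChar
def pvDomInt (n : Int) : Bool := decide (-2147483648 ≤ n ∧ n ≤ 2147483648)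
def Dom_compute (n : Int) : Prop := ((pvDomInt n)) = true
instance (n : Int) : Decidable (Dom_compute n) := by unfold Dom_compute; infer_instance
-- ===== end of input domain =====

-- B replaces A's two converging pointers with a per-index closed form; objective: simpler.

-- ===== PORT A =====
-- the while loop of A: state (l, r, prev_is_left)
def computeLoop (l r : Int) (prev : Bool) : List Int :=
  if _h : l ≤ r then
    if prev = false then l :: computeLoop (l + 1) r true
    else r :: computeLoop l (r - 1) false
  else []
termination_by (r + 1 - l).toNat
decreasing_by all_goals omega

def compute (n : Int) : List Int := computeLoop 1 n false

-- ===== PORT B =====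
def compute_alt (n : Int) : List Int :=
  (PySem.List.pyRange 0 n 1).map
    (fun i => if i % 2 = 0 then PySem.Int.floordiv i 2 + 1 else n - PySem.Int.floordiv i 2)

-- ===== PRECONDITION & SPEC =====
def Spec_compute (n : Int) (out : List Int) : Prop := out = compute_alt n
instance (n : Int) (out : List Int) : Decidable (Spec_compute n out) := by unfold Spec_compute; infer_instance

-- ===== CLAIM (what is proved, stated in full; the proofs are below) =====
def Claim_equal_compute : Prop := ∀ (n : Int), Dom_compute n → Spec_compute n (compute n)

-- ===== LEMMAS AND PROOFS =====

-- closed form of one loop output element, as a function of position i and the pointers l, r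
def elemF (l r i : Int) : Int :=
  if i % 2 = 0 then l + PySem.Int.floordiv i 2 else r - PySem.Int.floordiv i 2

lemma floordiv_add_two (i : Int) : PySem.Int.floordiv (i + 2) 2 = PySem.Int.floordiv i 2 + 1 := by
  show (i + 2).fdiv 2 = i.fdiv 2 + 1
  have := Int.add_mul_fdiv_right i 1 (c := 2) (by norm_num)
  simpa using this

lemma elemF_shift (l r i : Int) :
    elemF l r (i + 2) = elemF (l + 1) (r - 1) i := by
  unfold elemF
  have h1 : (i + 2) % 2 = i % 2 := by omega
  rw [floordiv_add_two, h1]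
  split_ifs <;> omega

lemma range_map_two_shift (k : Nat) (f : Int → Int) :
    (List.range (k + 2)).map (fun j : Nat => f (j : Int)) =
      f 0 :: f 1 :: (List.range k).map (fun j : Nat => f ((j : Int) + 2)) := by
  rw [List.range_succ_eq_map, List.range_succ_eq_map]
  simp only [List.map_cons, List.map_map, Nat.cast_zero, Nat.cast_succ]
  refine congrArg _ (congrArg _ ?_)
  apply List.map_congr_left
  intro a _
  simp only [Function.comp_apply]
  congr 1

lemma computeLoop_eq (k : Nat) : ∀ l r : Int, (r + 1 - l).toNat = k →
    computeLoop l r false = (List.range k).map (fun j : Nat => elemF l r (j : Int)) := by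
  induction k using Nat.strong_induction_on with
  | _ k ih =>
    intro l r hk
    match k, hk with
    | 0, hk =>
      rw [computeLoop]
      simp only [List.range_zero, List.map_nil]
      rw [dif_neg (by omega)]
    | 1, hk =>
      rw [computeLoop]
      rw [dif_pos (by omega), if_pos rfl]
      rw [computeLoop]
      rw [dif_neg (by omega)]
      simp [elemF, PySem.Int.floordiv]
    | (k + 2), hk =>
      rw [computeLoop]
      rw [dif_pos (by omega), if_pos rfl]
      rw [computeLoop]
      rw [dif_pos (by omega), if_neg (by simp)]
      rw [ih k (by omega) (l + 1) (r - 1) (by omega)]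
      rw [range_map_two_shift k (elemF l r)]
      have h0 : elemF l r 0 = l := by simp [elemF, PySem.Int.floordiv]
      have h1 : elemF l r 1 = r := by simp [elemF, PySem.Int.floordiv]
      rw [h0, h1]
      congr 1
      congr 1
      apply List.map_congr_left
      intro j _
      exact (elemF_shift l r (j : Int)).symm

lemma compute_alt_eq (n : Int) :
    compute_alt n = (List.range n.toNat).map (fun j : Nat => elemF 1 n (j : Int)) := by
  unfold compute_alt
  rw [PySem.List.pyRange_one]
  rw [List.map_map]
  simp only [Int.sub_zero]
  apply List.map_congr_left
  intro j _
  simp only [Function.comp, elemF, Int.zero_add]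
  split_ifs <;> omega

-- ===== VERDICT (by name: the statement is the Claim_ definition above) =====
theorem compute_spec : Claim_equal_compute := by
  intro n _
  unfold Spec_compute compute
  rw [computeLoop_eq n.toNat 1 n (by omega), compute_alt_eq]
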